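-- pv_equiv track=rewrite | github.com/steffenmaus/aoc2021_python | day09/day09.py | flood_maze
-- ===== SOURCE A (Python) =====
-- def get_all_nei_2d_4(p):
--     x, y = p
--     r = [(x, y + 1), (x, y - 1), (x + 1, y), (x - 1, y)]
--     return r
--
-- def flood_maze(maze, start):
--     open = set()
--     completed = set()
--     open.add(start)
--     while open:
--         current = open.pop()
--         completed.add(current)
--         for n in get_all_nei_2d_4(current):
--             if n in maze.keys() and n not in completed:
--                 if maze[n] != 9:
--                     open.add(n)
--     return completed
-- ===== SOURCE B (Python) =====
-- def flood_maze(maze, start):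
--     # fixed-point iteration: no worklist/frontier; rescan every maze cell each
--     # round, absorbing any non-9 cell adjacent to the region, until stable
--     completed = {start}
--     changed = True
--     while changed:
--         changed = False
--         for (x, y), height in maze.items():
--             if height != 9 and (x, y) not in completed:
--                 if any(n in completed for n in ((x, y + 1), (x, y - 1), (x + 1, y), (x - 1, y))):
--                     completed.add((x, y))
--                     changed = True
--     return completed
-- ===== Notes on version B (the rewrite author's own statement) =====
-- stated objective: alternative
-- what changed: A's worklist flood fill (pop a cell from an `open` set, push its unseen non-9 neighbours) is replaced by a worklist-free chaotic fixed-point iteration: repeatedly rescan ALL maze cells and absorb any non-9 cell adjacent to the current region until a full pass changes nothing; the result is the same set because both compute the closure of {start} under the same adjacency relation, which is traversal-independent.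
import Mathlib
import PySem

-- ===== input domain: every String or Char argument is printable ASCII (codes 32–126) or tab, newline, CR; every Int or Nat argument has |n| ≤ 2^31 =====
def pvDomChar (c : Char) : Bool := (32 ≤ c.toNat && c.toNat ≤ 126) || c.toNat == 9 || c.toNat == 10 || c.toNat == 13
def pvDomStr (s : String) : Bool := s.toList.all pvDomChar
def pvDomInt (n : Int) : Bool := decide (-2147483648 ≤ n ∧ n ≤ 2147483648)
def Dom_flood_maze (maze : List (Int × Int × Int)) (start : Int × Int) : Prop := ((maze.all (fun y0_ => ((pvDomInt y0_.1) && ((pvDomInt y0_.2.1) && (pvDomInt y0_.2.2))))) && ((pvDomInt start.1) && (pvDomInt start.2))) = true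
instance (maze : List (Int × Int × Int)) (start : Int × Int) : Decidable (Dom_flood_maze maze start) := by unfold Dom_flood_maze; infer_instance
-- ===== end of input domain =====

-- B replaces A's worklist flood fill (pop a cell from `open`, push its unseen non-9
-- neighbours) by a worklist-free fixed-point iteration: rescan ALL maze cells each round,
-- absorbing any non-9 cell adjacent to the region, until a full pass changes nothing.
-- Both functions return a Python `set` (unordered); both ports therefore return the canonical
-- representation of that set: its distinct elements sorted lexicographically (Python tuple order).

-- shared helpers: the maze dict and the canonical representation of a returned set
def pvDictOf (maze : List (Int × Int × Int)) : PySem.Dict (Int × Int) Int :=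
  PySem.Dict.ofList (maze.map (fun e => ((e.1, e.2.1), e.2.2)))

def pvCanon (s : List (Int × Int)) : List (Int × Int) :=
  (PySem.List.sorted (s.map (fun p => toLex p)) (fun q => q) false).map (fun q => ofLex q)

-- ===== PORT A =====
def get_all_nei_2d_4 (p : Int × Int) : List (Int × Int) :=
  [(p.1, p.2 + 1), (p.1, p.2 - 1), (p.1 + 1, p.2), (p.1 - 1, p.2)]

-- the while-loop of A; `open.pop()` takes an arbitrary element of the set (Python leaves the
-- choice unspecified) — modelled here as the last element; fuel makes the loop total, and
-- maze.length + 2 steps are proved sufficient below.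
def pvLoopA (d : PySem.Dict (Int × Int) Int) :
    Nat → PySem.Set (Int × Int) → PySem.Set (Int × Int) → PySem.Set (Int × Int)
  | 0, _, completed => completed
  | fuel + 1, opn, completed =>
    match opn.getLast? with
    | none => completed
    | some current =>
      let opn' := opn.dropLast
      let completed' := PySem.Set.add completed current
      let opn'' := (get_all_nei_2d_4 current).foldl (fun o n =>
        if PySem.Dict.contains d n && !(PySem.Set.contains completed' n) then
          if PySem.Dict.getD d n 0 != 9 then PySem.Set.add o n else o
        else o) opn'
      pvLoopA d fuel opn'' completed'

def flood_maze (maze : List (Int × Int × Int)) (start : Int × Int) : List (Int × Int) :=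
  let d := pvDictOf maze
  let opn := PySem.Set.add PySem.Set.empty start
  pvCanon (pvLoopA d (maze.length + 2) opn PySem.Set.empty)

-- ===== PORT B =====
-- one item of B's inner `for (x, y), height in maze.items()` scan
def pvStepB (st : PySem.Set (Int × Int) × Bool) (e : (Int × Int) × Int) :
    PySem.Set (Int × Int) × Bool :=
  if e.2 != 9 && !(PySem.Set.contains st.1 e.1)
      && ([(e.1.1, e.1.2 + 1), (e.1.1, e.1.2 - 1), (e.1.1 + 1, e.1.2), (e.1.1 - 1, e.1.2)].any
            (fun n => PySem.Set.contains st.1 n)) then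
    (PySem.Set.add st.1 e.1, true)
  else st

-- one full pass of B over maze.items(), with the `changed` flag (initially False)
def pvRoundB (d : PySem.Dict (Int × Int) Int) (completed : PySem.Set (Int × Int)) :
    PySem.Set (Int × Int) × Bool :=
  d.items.foldl pvStepB (completed, false)

-- B's `while changed` loop; fuel makes it total, maze.length + 2 is proved sufficient below
def pvLoopB (d : PySem.Dict (Int × Int) Int) :
    Nat → PySem.Set (Int × Int) → PySem.Set (Int × Int)
  | 0, completed => completed
  | fuel + 1, completed =>
    let st := pvRoundB d completed
    if st.2 then pvLoopB d fuel st.1 else st.1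

def flood_maze_alt (maze : List (Int × Int × Int)) (start : Int × Int) : List (Int × Int) :=
  let d := pvDictOf maze
  let completed := PySem.Set.add PySem.Set.empty start
  pvCanon (pvLoopB d (maze.length + 2) completed)

-- ===== PRECONDITION & SPEC =====
def Spec_flood_maze (maze : List (Int × Int × Int)) (start : Int × Int) (out : List (Int × Int)) : Prop := out = flood_maze_alt maze start
instance (maze : List (Int × Int × Int)) (start : Int × Int) (out : List (Int × Int)) : Decidable (Spec_flood_maze maze start out) := by unfold Spec_flood_maze; infer_instance

-- ===== CLAIM (what is proved, stated in full; the proofs are below) =====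
def Claim_equal_flood_maze : Prop := ∀ (maze : List (Int × Int × Int)) (start : Int × Int), Dom_flood_maze maze start → Spec_flood_maze maze start (flood_maze maze start)

-- ===== LEMMAS AND PROOFS =====

def pvElig (d : PySem.Dict (Int × Int) Int) (n : Int × Int) : Prop :=
  PySem.Dict.contains d n = true ∧ PySem.Dict.getD d n 0 ≠ 9

def pvEdge (d : PySem.Dict (Int × Int) Int) (c n : Int × Int) : Prop :=
  n ∈ get_all_nei_2d_4 c ∧ pvElig d n

def pvReach (d : PySem.Dict (Int × Int) Int) (start x : Int × Int) : Prop :=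
  Relation.ReflTransGen (pvEdge d) start x

def pvRest (d : PySem.Dict (Int × Int) Int) (o c : List (Int × Int)) : Nat :=
  (d.keys.filter (fun k => decide (k ∉ o ∧ k ∉ c))).length

def pvMu (d : PySem.Dict (Int × Int) Int) (c : List (Int × Int)) : Nat :=
  (d.keys.filter (fun k => decide (k ∉ c))).length

lemma pv_filter_le {α : Type} (l : List α) (p q : α → Bool)
    (h : ∀ a, q a = true → p a = true) : (l.filter q).length ≤ (l.filter p).length := by
  have he : l.filter q = (l.filter p).filter q := by
    rw [List.filter_filter]
    apply List.filter_congr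
    intro a _
    cases hq : q a with
    | true => simp [h a hq]
    | false => simp
  rw [he]; exact List.length_filter_le _ _

lemma pv_filter_lt {α : Type} (l : List α) (p q : α → Bool)
    (h : ∀ a, q a = true → p a = true) (n : α) (hn : n ∈ l) (hp : p n = true)
    (hq : q n = false) : (l.filter q).length < (l.filter p).length := by
  have he : l.filter q = (l.filter p).filter q := by
    rw [List.filter_filter]
    apply List.filter_congr
    intro a _
    cases hq' : q a with
    | true => simp [h a hq']
    | false => simp
  rw [he]
  exact List.length_filter_lt_length_iff_exists.mpr ⟨n, List.mem_filter.mpr ⟨hn, hp⟩, by simp [hq]⟩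

lemma pv_keys_len (maze : List (Int × Int × Int)) :
    (pvDictOf maze).keys.length ≤ maze.length := by
  have h : (pvDictOf maze).keys
      = PySem.Set.update (PySem.Dict.empty (κ := Int × Int) (ν := Int)).keys
          ((maze.map (fun e => ((e.1, e.2.1), e.2.2))).map Prod.fst) :=
    PySem.Dict.keys_foldl_insert_key _ Prod.fst (fun _ x => x.2) _
  rw [h, PySem.Dict.keys_empty, PySem.Set.update_nil_left]
  calc (PySem.Set.ofList _).length ≤ _ := PySem.Set.length_ofList_le _
    _ ≤ maze.length := by simp

lemma pvCanon_eq (l₁ l₂ : List (Int × Int)) (h₁ : l₁.Nodup) (h₂ : l₂.Nodup)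
    (hm : ∀ x, x ∈ l₁ ↔ x ∈ l₂) : pvCanon l₁ = pvCanon l₂ := by
  have hperm : l₁.Perm l₂ := (List.perm_ext_iff_of_nodup h₁ h₂).mpr hm
  unfold pvCanon
  rw [PySem.List.sorted_eq_sorted_of_perm _ _ _ (fun a b hab => by simpa using hab)
      (hperm.map (fun p => toLex p))]

lemma nei_symm (c n : Int × Int) : n ∈ get_all_nei_2d_4 c ↔ c ∈ get_all_nei_2d_4 n := by
  obtain ⟨cx, cy⟩ := c
  obtain ⟨nx, ny⟩ := n
  simp only [get_all_nei_2d_4, List.mem_cons, Prod.mk.injEq,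
    List.not_mem_nil, or_false]
  omega

-- membership in A's neighbour fold, no hypotheses (for soundness)
lemma foldA_mem (d : PySem.Dict (Int × Int) Int) (c' : PySem.Set (Int × Int)) :
    ∀ (ns : List (Int × Int)) (o : PySem.Set (Int × Int)), ∀ y ∈ ns.foldl (fun o n =>
        if PySem.Dict.contains d n && !(PySem.Set.contains c' n) then
          if PySem.Dict.getD d n 0 != 9 then PySem.Set.add o n else o
        else o) o, y ∈ o ∨ (y ∈ ns ∧ pvElig d y) := by
  intro ns
  induction ns with
  | nil => intro o y hy; exact Or.inl hy
  | cons n ns ih =>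
    intro o y hy
    simp only [List.foldl_cons] at hy
    rcases ih _ y hy with h | h
    · by_cases h1 : (PySem.Dict.contains d n && !(PySem.Set.contains c' n)) = true
      · by_cases h2 : (PySem.Dict.getD d n 0 != 9) = true
        · rw [if_pos h1, if_pos h2] at h
          rcases (PySem.Set.mem_add _ _ _).mp h with h' | h'
          · exact Or.inl h'
          · subst h'
            refine Or.inr ⟨List.mem_cons_self, ?_, ?_⟩
            · exact (Bool.and_eq_true _ _).mp h1 |>.1
            · exact bne_iff_ne.mp h2
        · rw [if_pos h1, if_neg h2] at h; exact Or.inl h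
      · rw [if_neg h1] at h; exact Or.inl h
    · exact Or.inr ⟨List.mem_cons_of_mem _ h.1, h.2⟩

lemma foldA_spec (d : PySem.Dict (Int × Int) Int) (c' : PySem.Set (Int × Int)) :
    ∀ (ns : List (Int × Int)) (o : PySem.Set (Int × Int)), o.Nodup → (∀ y ∈ o, y ∉ c') →
      (ns.foldl (fun o n =>
        if PySem.Dict.contains d n && !(PySem.Set.contains c' n) then
          if PySem.Dict.getD d n 0 != 9 then PySem.Set.add o n else o
        else o) o).Nodup ∧
      (∀ y ∈ o, y ∈ ns.foldl (fun o n =>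
        if PySem.Dict.contains d n && !(PySem.Set.contains c' n) then
          if PySem.Dict.getD d n 0 != 9 then PySem.Set.add o n else o
        else o) o) ∧
      (∀ y ∈ ns.foldl (fun o n =>
        if PySem.Dict.contains d n && !(PySem.Set.contains c' n) then
          if PySem.Dict.getD d n 0 != 9 then PySem.Set.add o n else o
        else o) o, y ∉ c') ∧
      (∀ n ∈ ns, pvElig d n → n ∉ c' → n ∈ ns.foldl (fun o n =>
        if PySem.Dict.contains d n && !(PySem.Set.contains c' n) then
          if PySem.Dict.getD d n 0 != 9 then PySem.Set.add o n else o
        else o) o) ∧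
      (ns.foldl (fun o n =>
        if PySem.Dict.contains d n && !(PySem.Set.contains c' n) then
          if PySem.Dict.getD d n 0 != 9 then PySem.Set.add o n else o
        else o) o).length + pvRest d (ns.foldl (fun o n =>
        if PySem.Dict.contains d n && !(PySem.Set.contains c' n) then
          if PySem.Dict.getD d n 0 != 9 then PySem.Set.add o n else o
        else o) o) c' ≤ o.length + pvRest d o c' := by
  intro ns
  induction ns with
  | nil => intro o h1 h2; exact ⟨h1, fun y hy => hy, h2, by simp, le_refl _⟩
  | cons n ns ih =>
    intro o ho hdisj
    simp only [List.foldl_cons]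
    by_cases h1 : (PySem.Dict.contains d n && !(PySem.Set.contains c' n)) = true
    · by_cases h2 : (PySem.Dict.getD d n 0 != 9) = true
      · rw [if_pos h1, if_pos h2]
        have hnc' : n ∉ c' := by
          have := ((Bool.and_eq_true _ _).mp h1).2
          simpa [PySem.Set.contains_iff] using this
        by_cases hno : n ∈ o
        · rw [PySem.Set.add_of_mem hno]
          obtain ⟨H1, H2, H3, H4, H5⟩ := ih o ho hdisj
          refine ⟨H1, H2, H3, ?_, H5⟩
          intro m hm he hnc
          rcases List.mem_cons.mp hm with rfl | hm'
          · exact H2 m hno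
          · exact H4 m hm' he hnc
        · rw [PySem.Set.add_of_not_mem hno]
          have ho' : (o ++ [n]).Nodup := by
            rw [List.nodup_append]
            exact ⟨ho, List.nodup_singleton _, by
              intro a ha b hb
              simp only [List.mem_singleton] at hb
              subst hb
              exact fun he => hno (he ▸ ha)⟩
          have hdisj' : ∀ y ∈ o ++ [n], y ∉ c' := by
            intro y hy
            rcases List.mem_append.mp hy with hy | hy
            · exact hdisj y hy
            · simp at hy; subst hy; exact hnc'
          obtain ⟨H1, H2, H3, H4, H5⟩ := ih (o ++ [n]) ho' hdisj'
          refine ⟨H1, fun y hy => H2 y (List.mem_append_left _ hy), H3, ?_, ?_⟩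
          · intro m hm he hnc
            rcases List.mem_cons.mp hm with rfl | hm'
            · exact H2 m (by simp)
            · exact H4 m hm' he hnc
          · have hkey : n ∈ d.keys := by
              exact (PySem.Dict.contains_iff_mem_keys d n).mp ((Bool.and_eq_true _ _).mp h1).1
            have hlt : pvRest d (o ++ [n]) c' < pvRest d o c' := by
              refine pv_filter_lt _ _ _ ?_ n hkey ?_ ?_
              · intro a ha
                simp only [decide_eq_true_eq] at ha ⊢
                exact ⟨fun hao => ha.1 (List.mem_append_left _ hao), ha.2⟩
              · exact decide_eq_true ⟨hno, hnc'⟩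
              · exact decide_eq_false (fun h => h.1 (List.mem_append_right _ (List.mem_singleton_self n)))
            have hlen : (o ++ [n]).length = o.length + 1 := by simp
            omega
      · rw [if_pos h1, if_neg h2]
        obtain ⟨H1, H2, H3, H4, H5⟩ := ih o ho hdisj
        refine ⟨H1, H2, H3, ?_, H5⟩
        intro m hm he hnc
        rcases List.mem_cons.mp hm with rfl | hm'
        · exact absurd (bne_iff_ne.mpr he.2) (by simpa using h2)
        · exact H4 m hm' he hnc
    · rw [if_neg h1]
      obtain ⟨H1, H2, H3, H4, H5⟩ := ih o ho hdisj
      refine ⟨H1, H2, H3, ?_, H5⟩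
      intro m hm he hnc
      rcases List.mem_cons.mp hm with rfl | hm'
      · exfalso
        apply h1
        simp only [Bool.and_eq_true]
        exact ⟨he.1, by simpa [PySem.Set.contains_iff] using hnc⟩
      · exact H4 m hm' he hnc

lemma loopA_sound (d : PySem.Dict (Int × Int) Int) (P : (Int × Int) → Prop)
    (hP : ∀ c n, P c → pvEdge d c n → P n) :
    ∀ fuel opn completed, (∀ x ∈ opn, P x) → (∀ x ∈ completed, P x) →
      ∀ x ∈ pvLoopA d fuel opn completed, P x := by
  intro fuel
  induction fuel with
  | zero =>
    intro opn c ho hc x hx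
    rw [pvLoopA] at hx
    exact hc x hx
  | succ fuel ih =>
    intro opn c ho hc x hx
    cases hlast : opn.getLast? with
    | none =>
      rw [pvLoopA] at hx
      simp only [hlast] at hx
      exact hc x hx
    | some current =>
      rw [pvLoopA] at hx
      simp only [hlast] at hx
      have hcur : P current := ho current (List.mem_of_getLast? hlast)
      refine ih _ _ ?_ ?_ x hx
      · intro y hy
        rcases foldA_mem d _ _ _ y hy with hy' | hy'
        · exact ho y ((List.dropLast_sublist _).subset hy')
        · exact hP current y hcur ⟨hy'.1, hy'.2⟩
      · intro y hy
        rcases (PySem.Set.mem_add _ _ _).mp hy with hy' | hy'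
        · exact hc y hy'
        · exact hy' ▸ hcur

lemma loopA_complete (d : PySem.Dict (Int × Int) Int) :
    ∀ fuel (s c : List (Int × Int)), s.Nodup → c.Nodup → (∀ x ∈ s, x ∉ c) →
      s.length + pvRest d s c ≤ fuel →
      (∀ x ∈ c, ∀ n, pvEdge d x n → n ∈ s ∨ n ∈ c) →
      (pvLoopA d fuel s c).Nodup ∧
      (∀ x, x ∈ s ∨ x ∈ c → x ∈ pvLoopA d fuel s c) ∧
      (∀ x ∈ pvLoopA d fuel s c, ∀ n, pvEdge d x n → n ∈ pvLoopA d fuel s c) := by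
  intro fuel
  induction fuel with
  | zero =>
    intro s c hs hc hdisj hfuel hinv
    have hs0 : s = [] := List.eq_nil_of_length_eq_zero (by omega)
    subst hs0
    rw [pvLoopA]
    refine ⟨hc, ?_, ?_⟩
    · rintro x (hx | hx)
      · simp at hx
      · exact hx
    · intro x hx n hn
      rcases hinv x hx n hn with h | h
      · simp at h
      · exact h
  | succ fuel ih =>
    intro s c hs hc hdisj hfuel hinv
    cases hlast : s.getLast? with
    | none =>
      have hs0 : s = [] := List.getLast?_eq_none_iff.mp hlast
      subst hs0
      rw [pvLoopA]
      simp only [List.getLast?_nil]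
      refine ⟨hc, ?_, ?_⟩
      · rintro x (hx | hx)
        · simp at hx
        · exact hx
      · intro x hx n hn
        rcases hinv x hx n hn with h | h
        · simp at h
        · exact h
    | some x =>
      have hsx : s.dropLast ++ [x] = s := List.dropLast_append_getLast? x hlast
      have hxs : x ∈ s := List.mem_of_getLast? hlast
      have hnd : (s.dropLast ++ [x]).Nodup := by rw [hsx]; exact hs
      have hs0 : s.dropLast.Nodup := hnd.of_append_left
      have hxnot : x ∉ s.dropLast := by
        rw [List.nodup_append] at hnd
        intro hmem
        exact hnd.2.2 x hmem x (List.mem_singleton_self x) rfl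
      have hxc : x ∉ c := hdisj x hxs
      have hcadd : PySem.Set.add c x = c ++ [x] := PySem.Set.add_of_not_mem hxc
      have hc' : (PySem.Set.add c x).Nodup := PySem.Set.nodup_add c x hc
      have hdisj' : ∀ y ∈ s.dropLast, y ∉ PySem.Set.add c x := by
        intro y hy
        rw [hcadd]
        intro hmem
        rcases List.mem_append.mp hmem with h | h
        · exact hdisj y ((List.dropLast_sublist _).subset hy) h
        · simp only [List.mem_singleton] at h
          exact hxnot (h ▸ hy)
      obtain ⟨F1, F2, F3, F4, F5⟩ :=
        foldA_spec d (PySem.Set.add c x) (get_all_nei_2d_4 x) s.dropLast hs0 hdisj'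
      set s'' := (get_all_nei_2d_4 x).foldl (fun o n =>
        if PySem.Dict.contains d n && !(PySem.Set.contains (PySem.Set.add c x) n) then
          if PySem.Dict.getD d n 0 != 9 then PySem.Set.add o n else o
        else o) s.dropLast with hs''
      have hmono : pvRest d s.dropLast (PySem.Set.add c x) ≤ pvRest d s c := by
        refine pv_filter_le _ _ _ ?_
        intro a ha
        simp only [decide_eq_true_eq] at ha ⊢
        rw [hcadd] at ha
        constructor
        · intro hmem
          rw [← hsx] at hmem
          rcases List.mem_append.mp hmem with h | h
          · exact ha.1 h
          · simp only [List.mem_singleton] at h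
            subst h
            exact ha.2 (List.mem_append_right _ (List.mem_singleton_self a))
        · exact fun hmem => ha.2 (List.mem_append_left _ hmem)
      have hslen : s.length = s.dropLast.length + 1 := by
        rw [← hsx]; simp
      have hfuel' : s''.length + pvRest d s'' (PySem.Set.add c x) ≤ fuel := by
        have := F5
        omega
      have hinv' : ∀ y ∈ PySem.Set.add c x, ∀ n, pvEdge d y n → n ∈ s'' ∨ n ∈ PySem.Set.add c x := by
        intro y hy n hn
        rcases (PySem.Set.mem_add _ _ _).mp hy with hy' | hy'
        · rcases hinv y hy' n hn with h | h
          · rw [← hsx] at h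
            rcases List.mem_append.mp h with h' | h'
            · exact Or.inl (F2 n h')
            · simp only [List.mem_singleton] at h'
              exact Or.inr ((PySem.Set.mem_add _ _ _).mpr (Or.inr h'))
          · exact Or.inr ((PySem.Set.mem_add _ _ _).mpr (Or.inl h))
        · have hn' : pvEdge d x n := hy' ▸ hn
          by_cases hnc : n ∈ PySem.Set.add c x
          · exact Or.inr hnc
          · exact Or.inl (F4 n hn'.1 hn'.2 hnc)
      obtain ⟨I1, I2, I3⟩ := ih s'' (PySem.Set.add c x) F1 hc' F3 hfuel' hinv'
      have heq : pvLoopA d (fuel + 1) s c = pvLoopA d fuel s'' (PySem.Set.add c x) := by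
        rw [pvLoopA]
        simp only [hlast]
        rw [← hs'']
      rw [heq]
      refine ⟨I1, ?_, I3⟩
      rintro y (hy | hy)
      · rw [← hsx] at hy
        rcases List.mem_append.mp hy with h | h
        · exact I2 y (Or.inl (F2 y h))
        · simp only [List.mem_singleton] at h
          exact I2 y (Or.inr ((PySem.Set.mem_add _ _ _).mpr (Or.inr h)))
      · exact I2 y (Or.inr ((PySem.Set.mem_add _ _ _).mpr (Or.inl hy)))

-- ===== B-side lemmas =====

-- an item of d certifies eligibility of its key (value read back through getD)
lemma item_elig (d : PySem.Dict (Int × Int) Int) (hnd : d.keys.Nodup)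
    (e : (Int × Int) × Int) (he : e ∈ d.items) (h9 : e.2 ≠ 9) : pvElig d e.1 := by
  have hk : e.1 ∈ d.keys := PySem.Dict.mem_keys_of_mem_items d he
  have hget : d.getD e.1 0 = e.2 := by
    obtain ⟨k, v⟩ := e
    exact PySem.Dict.getD_of_mem_items d he hnd 0
  exact ⟨(PySem.Dict.contains_iff_mem_keys d e.1).mpr hk, by rw [hget]; exact h9⟩

-- a contained key occurs in items with its getD value
lemma contains_item (d : PySem.Dict (Int × Int) Int) (hnd : d.keys.Nodup)
    (n : Int × Int) (hc : PySem.Dict.contains d n = true) : (n, d.getD n 0) ∈ d.items := by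
  have hk : n ∈ d.keys := (PySem.Dict.contains_iff_mem_keys d n).mp hc
  simp only [PySem.Dict.keys] at hk
  obtain ⟨e, he, hfst⟩ := List.mem_map.mp hk
  have : d.getD n 0 = e.2 := by
    obtain ⟨k, v⟩ := e
    simp only at hfst
    subst hfst
    exact PySem.Dict.getD_of_mem_items d he hnd 0
  rw [this, ← hfst]
  exact he

-- everything about one pass of B, by one induction over the scanned items
lemma foldB_spec (d : PySem.Dict (Int × Int) Int) (hnd : d.keys.Nodup)
    (P : (Int × Int) → Prop) (hP : ∀ c n, P c → pvEdge d c n → P n) :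
    ∀ (ls : List ((Int × Int) × Int)) (st : PySem.Set (Int × Int) × Bool),
      st.1.Nodup → (∀ e ∈ ls, e ∈ d.items) →
      (ls.foldl pvStepB st).1.Nodup ∧
      (∀ y ∈ st.1, y ∈ (ls.foldl pvStepB st).1) ∧
      ((∀ x ∈ st.1, P x) → ∀ x ∈ (ls.foldl pvStepB st).1, P x) ∧
      (st.2 = true → (ls.foldl pvStepB st).2 = true) ∧
      ((ls.foldl pvStepB st).2 = false → (ls.foldl pvStepB st).1 = st.1) ∧
      (st.2 = false → (ls.foldl pvStepB st).2 = true →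
        ∃ y ∈ (ls.foldl pvStepB st).1, y ∉ st.1 ∧ y ∈ d.keys) ∧
      ((ls.foldl pvStepB st).2 = false → ∀ e ∈ ls, e.2 ≠ 9 →
        (∃ m ∈ get_all_nei_2d_4 e.1, m ∈ st.1) → e.1 ∈ st.1) := by
  intro ls
  induction ls with
  | nil =>
    intro st h1 _
    refine ⟨h1, fun y hy => hy, fun h => h, fun h => h, fun _ => rfl, ?_, by simp⟩
    intro hf ht
    simp only [List.foldl_nil] at ht
    rw [hf] at ht
    exact absurd ht (by simp)
  | cons e ls ih =>
    intro st hst hls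
    simp only [List.foldl_cons]
    by_cases hcond : (e.2 != 9 && !(PySem.Set.contains st.1 e.1)
        && ([(e.1.1, e.1.2 + 1), (e.1.1, e.1.2 - 1), (e.1.1 + 1, e.1.2), (e.1.1 - 1, e.1.2)].any
              (fun n => PySem.Set.contains st.1 n))) = true
    · have hstep : pvStepB st e = (PySem.Set.add st.1 e.1, true) := by
        rw [pvStepB, if_pos hcond]
      simp only [Bool.and_eq_true] at hcond
      obtain ⟨⟨h9, hnotin⟩, hany⟩ := hcond
      have hnmem : e.1 ∉ st.1 := by simpa [PySem.Set.contains_iff] using hnotin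
      have helig : pvElig d e.1 :=
        item_elig d hnd e (hls e List.mem_cons_self) (bne_iff_ne.mp h9)
      obtain ⟨m, hm1, hm2⟩ := List.any_eq_true.mp hany
      have hmmem : m ∈ st.1 := (PySem.Set.contains_iff _ _).mp hm2
      have hmnei' : m ∈ get_all_nei_2d_4 e.1 := hm1
      rw [hstep]
      have hnodup' : (PySem.Set.add st.1 e.1).Nodup := PySem.Set.nodup_add _ _ hst
      obtain ⟨I1, I2, I3, I4, I5, I6, I7⟩ :=
        ih (PySem.Set.add st.1 e.1, true) hnodup' (fun e' he' => hls e' (List.mem_cons_of_mem _ he'))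
      have hRtrue : (ls.foldl pvStepB (PySem.Set.add st.1 e.1, true)).2 = true := I4 rfl
      refine ⟨I1, ?_, ?_, fun _ => hRtrue, ?_, ?_, ?_⟩
      · intro y hy
        exact I2 y ((PySem.Set.mem_add _ _ _).mpr (Or.inl hy))
      · intro hPst
        refine I3 ?_
        intro x hx
        rcases (PySem.Set.mem_add _ _ _).mp hx with h | h
        · exact hPst x h
        · subst h
          exact hP m e.1 (hPst m hmmem) ⟨(nei_symm e.1 m).mp hmnei', helig⟩
      · intro hfalse
        exact absurd hRtrue (by simp [hfalse])
      · intro _ _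
        refine ⟨e.1, I2 e.1 ((PySem.Set.mem_add _ _ _).mpr (Or.inr rfl)), hnmem, ?_⟩
        exact PySem.Dict.mem_keys_of_mem_items d (hls e List.mem_cons_self)
      · intro hfalse
        exact absurd hRtrue (by simp [hfalse])
    · have hstep : pvStepB st e = st := by rw [pvStepB, if_neg hcond]
      rw [hstep]
      obtain ⟨I1, I2, I3, I4, I5, I6, I7⟩ :=
        ih st hst (fun e' he' => hls e' (List.mem_cons_of_mem _ he'))
      refine ⟨I1, I2, I3, I4, I5, I6, ?_⟩
      intro hfalse e' he' h9 hex
      rcases List.mem_cons.mp he' with rfl | he''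
      · -- the condition was false although e'.2 ≠ 9 and a neighbour is present:
        -- the membership test must have succeeded
        by_cases hmem : e'.1 ∈ st.1
        · exact hmem
        · exfalso
          apply hcond
          simp only [Bool.and_eq_true]
          refine ⟨⟨bne_iff_ne.mpr h9, ?_⟩, ?_⟩
          · simp [hmem]
          · obtain ⟨m, hm1, hm2⟩ := hex
            exact List.any_eq_true.mpr ⟨m, hm1, (PySem.Set.contains_iff _ _).mpr hm2⟩
      · exact I7 hfalse e' he'' h9 hex

lemma loopB_sound (d : PySem.Dict (Int × Int) Int) (hnd : d.keys.Nodup)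
    (P : (Int × Int) → Prop) (hP : ∀ c n, P c → pvEdge d c n → P n) :
    ∀ fuel c, c.Nodup → (∀ x ∈ c, P x) → ∀ x ∈ pvLoopB d fuel c, P x := by
  intro fuel
  induction fuel with
  | zero =>
    intro c _ hc x hx
    rw [pvLoopB] at hx
    exact hc x hx
  | succ fuel ih =>
    intro c hnodup hc x hx
    rw [pvLoopB] at hx
    obtain ⟨F1, F2, F3, F4, F5, F6, F7⟩ := foldB_spec d hnd P hP d.items (c, false) hnodup (fun _ h => h)
    by_cases hflag : (pvRoundB d c).2 = true
    · simp only [pvRoundB] at hflag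
      simp only [pvRoundB, hflag, if_true] at hx
      exact ih _ F1 (F3 hc) x hx
    · simp only [pvRoundB] at hflag ⊢
      rw [Bool.not_eq_true] at hflag
      simp only [pvRoundB, hflag, Bool.false_eq_true, if_false] at hx
      exact F3 hc x hx

lemma loopB_complete (d : PySem.Dict (Int × Int) Int) (hnd : d.keys.Nodup) :
    ∀ fuel (c : List (Int × Int)), c.Nodup → pvMu d c < fuel →
      (pvLoopB d fuel c).Nodup ∧
      (∀ x ∈ c, x ∈ pvLoopB d fuel c) ∧
      (∀ x ∈ pvLoopB d fuel c, ∀ n, pvEdge d x n → n ∈ pvLoopB d fuel c) := by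
  intro fuel
  induction fuel with
  | zero =>
    intro c _ hfuel
    exact absurd hfuel (by omega)
  | succ fuel ih =>
    intro c hc hfuel
    have htriv : ∀ e ∈ d.items, e ∈ d.items := fun _ h => h
    obtain ⟨F1, F2, F3, F4, F5, F6, F7⟩ :=
      foldB_spec d hnd (fun _ => True) (fun _ _ _ _ => trivial) d.items (c, false) hc htriv
    by_cases hflag : (d.items.foldl pvStepB (c, false)).2 = true
    · -- a cell was added: the measure drops, recurse
      have heq : pvLoopB d (fuel + 1) c = pvLoopB d fuel (d.items.foldl pvStepB (c, false)).1 := by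
        rw [pvLoopB]
        simp only [pvRoundB, hflag, if_true]
      obtain ⟨y, hy1, hy2, hy3⟩ := F6 rfl hflag
      have hlt : pvMu d (d.items.foldl pvStepB (c, false)).1 < pvMu d c := by
        refine pv_filter_lt _ _ _ ?_ y hy3 (decide_eq_true hy2) ?_
        · intro a ha
          simp only [decide_eq_true_eq] at ha ⊢
          exact fun hac => ha (F2 a hac)
        · exact decide_eq_false (fun h => h hy1)
      obtain ⟨I1, I2, I3⟩ := ih _ F1 (by omega)
      rw [heq]
      exact ⟨I1, fun x hx => I2 x (F2 x hx), I3⟩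
    · -- fixed point reached: the pass changed nothing and the set is closed
      rw [Bool.not_eq_true] at hflag
      have heq : pvLoopB d (fuel + 1) c = c := by
        rw [pvLoopB]
        simp only [pvRoundB, hflag, Bool.false_eq_true, if_false]
        exact F5 hflag
      rw [heq]
      refine ⟨hc, fun x hx => hx, ?_⟩
      intro x hx n hn
      obtain ⟨hnei, hcont, h9⟩ := hn
      have hitem : (n, d.getD n 0) ∈ d.items := contains_item d hnd n hcont
      exact F7 hflag (n, d.getD n 0) hitem h9 ⟨x, (nei_symm x n).mp hnei, hx⟩

lemma pv_nodup_keys (maze : List (Int × Int × Int)) : (pvDictOf maze).keys.Nodup := by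
  exact PySem.Dict.nodup_keys_ofList _

lemma pv_main (maze : List (Int × Int × Int)) (start : Int × Int) :
    flood_maze maze start = flood_maze_alt maze start := by
  have hstart : PySem.Set.add PySem.Set.empty start = [start] := rfl
  show pvCanon (pvLoopA (pvDictOf maze) (maze.length + 2)
      (PySem.Set.add PySem.Set.empty start) PySem.Set.empty)
    = pvCanon (pvLoopB (pvDictOf maze) (maze.length + 2) (PySem.Set.add PySem.Set.empty start))
  rw [hstart]
  set d := pvDictOf maze with hd
  have hkeys : d.keys.length ≤ maze.length := pv_keys_len maze
  have hnd : d.keys.Nodup := pv_nodup_keys maze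
  -- A side
  obtain ⟨nA, mA, cA⟩ := loopA_complete d (maze.length + 2) [start] []
    (List.nodup_singleton _) List.nodup_nil (by simp)
    (by
      have h1 : pvRest d [start] [] ≤ d.keys.length := List.length_filter_le _ _
      simp only [List.length_singleton]
      omega)
    (by simp)
  have soundA := loopA_sound d (pvReach d start)
    (fun c n hc he => Relation.ReflTransGen.tail hc he)
    (maze.length + 2) [start] []
    (by
      intro x hx
      simp only [List.mem_singleton] at hx
      subst hx
      exact Relation.ReflTransGen.refl)
    (by simp)
  have reachInA : ∀ x, pvReach d start x → x ∈ pvLoopA d (maze.length + 2) [start] [] := by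
    intro x h
    induction h with
    | refl => exact mA start (Or.inl (List.mem_singleton_self _))
    | tail _ he ih => exact cA _ ih _ he
  -- B side
  obtain ⟨nB, mB, cB⟩ := loopB_complete d hnd (maze.length + 2) [start]
    (List.nodup_singleton _)
    (by
      have h1 : pvMu d [start] ≤ d.keys.length := List.length_filter_le _ _
      omega)
  have soundB := loopB_sound d hnd (pvReach d start)
    (fun c n hc he => Relation.ReflTransGen.tail hc he)
    (maze.length + 2) [start] (List.nodup_singleton _)
    (by
      intro x hx
      simp only [List.mem_singleton] at hx
      subst hx
      exact Relation.ReflTransGen.refl)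
  have reachInB : ∀ x, pvReach d start x → x ∈ pvLoopB d (maze.length + 2) [start] := by
    intro x h
    induction h with
    | refl => exact mB start (List.mem_singleton_self _)
    | tail _ he ih => exact cB _ ih _ he
  refine pvCanon_eq _ _ nA nB ?_
  intro x
  constructor
  · intro hx
    exact reachInB x (soundA x hx)
  · intro hx
    exact reachInA x (soundB x hx)

-- ===== VERDICT (by name: the statement is the Claim_ definition above) =====
theorem flood_maze_spec : Claim_equal_flood_maze := by
  intro maze start _
  exact pv_main maze start
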